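-- pv_equiv track=rewrite | github.com/Zaroganos/goldflipper | goldflipper/tools/play_csv_ingestion_tool.py | detect_puts_start
-- ===== SOURCE A (Python) =====
-- PUTS_START = 25
--
-- def detect_puts_start(composite_headers):
--     """Detect the starting column index of the Puts section based on headers.
--     Strategy: find the second 'Ticket' header; subtract the relative offset for symbol (2).
--     Fallback to legacy PUTS_START if detection fails.
--     """
--     indices = [i for i, h in enumerate(composite_headers) if isinstance(h, str) and "ticket" in h.lower()]
--     if len(indices) >= 2:
--         ticket_idx_puts = indices[1]
--         start = max(0, ticket_idx_puts - 2)
--         return start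
--     # Alternate: look for the literal 'Puts' banner cell
--     for i, h in enumerate(composite_headers):
--         if isinstance(h, str) and "puts" in h.lower():
--             # Heuristic: banner sits at first column of puts block
--             return i
--     return PUTS_START
-- ===== SOURCE B (Python) =====
-- PUTS_START = 25
--
--
-- def _find_in(headers, needle):
--     """Index of the first header containing needle (case-insensitive), or None."""
--     for k, h in enumerate(headers):
--         if isinstance(h, str) and needle in h.lower():
--             return k
--     return None
--
--
-- def detect_puts_start(composite_headers):
--     """Staged early-exit searches: locate the first 'ticket' header, then search
--     only the slice after it for a second one; scan for 'puts' only if needed.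
--     No index list is ever materialized."""
--     i = _find_in(composite_headers, "ticket")
--     if i is not None:
--         j = _find_in(composite_headers[i + 1:], "ticket")
--         if j is not None:
--             return max(0, i + 1 + j - 2)
--     p = _find_in(composite_headers, "puts")
--     return p if p is not None else PUTS_START
-- ===== Notes on version B (the rewrite author's own statement) =====
-- stated objective: alternative
-- what changed: Instead of materializing the full list of all 'ticket' indices and taking the second, B does two staged early-exit searches (first 'ticket', then 'ticket' in the slice after it) and scans for 'puts' only when needed.
import Mathlib
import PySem

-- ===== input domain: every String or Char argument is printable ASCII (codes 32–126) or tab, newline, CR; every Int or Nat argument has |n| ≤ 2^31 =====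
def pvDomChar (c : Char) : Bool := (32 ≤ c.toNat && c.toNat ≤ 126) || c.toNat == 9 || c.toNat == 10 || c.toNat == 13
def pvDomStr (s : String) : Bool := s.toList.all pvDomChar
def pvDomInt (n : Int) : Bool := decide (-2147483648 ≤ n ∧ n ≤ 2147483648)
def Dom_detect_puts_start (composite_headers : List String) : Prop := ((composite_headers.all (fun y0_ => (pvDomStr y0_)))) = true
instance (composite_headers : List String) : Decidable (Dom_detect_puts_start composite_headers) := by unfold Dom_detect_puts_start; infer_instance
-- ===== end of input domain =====

-- B replaces A's materialized list of all 'ticket' indices by two staged early-exit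
-- searches (first 'ticket', then 'ticket' in the slice after it), scanning for 'puts'
-- only when needed: alternative decomposition, same asymptotic cost.


-- ===== PORT A =====
def detect_puts_start (composite_headers : List String) : Int :=
  -- indices = [i for i, h in enumerate(...) if "ticket" in h.lower()]
  let indices : List Int :=
    ((PySem.List.enumerate composite_headers).filter
      (fun p => PySem.Str.isIn "ticket" (PySem.Str.lower p.2))).map (·.1)
  if indices.length ≥ 2 then
    let ticket_idx_puts := indices[1]!
    let start := max 0 (ticket_idx_puts - 2)
    start
  else
    -- for i, h in enumerate(...): if "puts" in h.lower(): return i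
    match (PySem.List.enumerate composite_headers).find?
        (fun p => PySem.Str.isIn "puts" (PySem.Str.lower p.2)) with
    | some p => p.1
    | none => 25

-- ===== PORT B =====
-- _find_in: first index whose header contains the needle (case-insensitive), else None
def pvFindIn (headers : List String) (needle : String) : Option Int :=
  ((PySem.List.enumerate headers).find?
    (fun p => PySem.Str.isIn needle (PySem.Str.lower p.2))).map (·.1)

def detect_puts_start_alt (composite_headers : List String) : Int :=
  let fallback : Int :=
    match pvFindIn composite_headers "puts" with
    | some p => p
    | none => 25
  match pvFindIn composite_headers "ticket" with
  | some i =>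
    match pvFindIn (PySem.List.slice composite_headers (some (i + 1)) none) "ticket" with
    | some j => max 0 (i + 1 + j - 2)
    | none => fallback
  | none => fallback

-- ===== PRECONDITION & SPEC =====
def Spec_detect_puts_start (composite_headers : List String) (out : Int) : Prop := out = detect_puts_start_alt composite_headers
instance (composite_headers : List String) (out : Int) : Decidable (Spec_detect_puts_start composite_headers out) := by unfold Spec_detect_puts_start; infer_instance

-- ===== CLAIM (what is proved, stated in full; the proofs are below) =====
def Claim_equal_detect_puts_start : Prop := ∀ (composite_headers : List String), Dom_detect_puts_start composite_headers → Spec_detect_puts_start composite_headers (detect_puts_start composite_headers)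

-- ===== LEMMAS AND PROOFS =====

-- Nat-level list of the positions of l satisfying q, in order.
def pvIdxs (q : String → Bool) : List String → List Nat
  | [] => []
  | h :: t => if q h then 0 :: (pvIdxs q t).map (· + 1) else (pvIdxs q t).map (· + 1)

theorem enum_filter_map_eq_idxs (q : String → Bool) :
    ∀ (l : List String) (s : Int),
    ((PySem.List.enumerate l s).filter (fun p => q p.2)).map (·.1) =
      (pvIdxs q l).map (fun k : Nat => s + (k : Int)) := by
  intro l
  induction l with
  | nil => intro s; simp [pvIdxs, PySem.List.enumerate_nil]
  | cons h t ih =>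
    intro s
    simp only [PySem.List.enumerate_cons, List.filter_cons, pvIdxs]
    by_cases hq : q h
    · simp only [hq, if_pos, List.map_cons, ih (s + 1), List.map_map, List.cons.injEq]
      refine ⟨by simp, ?_⟩
      apply List.map_congr_left
      intro k _
      simp only [Function.comp_apply]
      push_cast
      ring
    · simp only [hq, Bool.false_eq_true, if_false, ih (s + 1), List.map_map]
      apply List.map_congr_left
      intro k _
      simp only [Function.comp_apply]
      push_cast
      ring

theorem enum_find_map_eq_idxs_head (q : String → Bool) :
    ∀ (l : List String) (s : Int),
    ((PySem.List.enumerate l s).find? (fun p => q p.2)).map (·.1) =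
      (pvIdxs q l).head?.map (fun k : Nat => s + (k : Int)) := by
  intro l
  induction l with
  | nil => intro s; simp [pvIdxs, PySem.List.enumerate_nil]
  | cons h t ih =>
    intro s
    simp only [PySem.List.enumerate_cons, List.find?_cons, pvIdxs]
    by_cases hq : q h
    · simp [hq]
    · simp only [hq, Bool.false_eq_true, if_false, ih (s + 1)]
      cases ht : pvIdxs q t with
      | nil => simp
      | cons k0 r =>
        simp only [List.map_cons, List.head?_cons, Option.map_some]
        congr 1
        push_cast
        ring

-- After the first hit k0, the remaining hits are exactly the hits of the tail after k0, shifted.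
theorem idxs_tail_eq_drop (q : String → Bool) :
    ∀ (l : List String) (k0 : Nat) (rest : List Nat),
    pvIdxs q l = k0 :: rest →
    rest = (pvIdxs q (l.drop (k0 + 1))).map (· + (k0 + 1)) := by
  intro l
  induction l with
  | nil => intro k0 rest h; simp [pvIdxs] at h
  | cons h t ih =>
    intro k0 rest hEq
    by_cases hq : q h
    · simp only [pvIdxs, hq, if_pos, List.cons.injEq] at hEq
      obtain ⟨hk0, hrest⟩ := hEq
      subst hk0
      simpa using hrest.symm
    · simp only [pvIdxs, hq, Bool.false_eq_true, if_false] at hEq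
      cases ht : pvIdxs q t with
      | nil => rw [ht] at hEq; simp at hEq
      | cons k0' r =>
        rw [ht] at hEq
        simp only [List.map_cons, List.cons.injEq] at hEq
        obtain ⟨hk0, hrest⟩ := hEq
        have hr := ih k0' r ht
        subst hk0
        have hdrop : (h :: t).drop (k0' + 1 + 1) = t.drop (k0' + 1) := by simp
        rw [hdrop, ← hrest, hr, List.map_map]
        apply List.map_congr_left
        intro k _
        simp only [Function.comp_apply]
        omega

def pvQT (h : String) : Bool := PySem.Str.isIn "ticket" (PySem.Str.lower h)
def pvQP (h : String) : Bool := PySem.Str.isIn "puts" (PySem.Str.lower h)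

theorem fallback_eq (ch : List String) :
    (match (PySem.List.enumerate ch).find? (fun p : Int × String => pvQP p.2) with
     | some p => p.1
     | none => (25 : Int)) =
    (match (pvIdxs pvQP ch).head?.map (fun k : Nat => (0 : Int) + (k : Int)) with
     | some p => p
     | none => (25 : Int)) := by
  have hPrel := enum_find_map_eq_idxs_head pvQP ch 0
  cases hF : (PySem.List.enumerate ch).find? (fun p : Int × String => pvQP p.2) with
  | none =>
    rw [hF] at hPrel
    rw [← hPrel]
    rfl
  | some p =>
    rw [hF] at hPrel
    rw [← hPrel]
    rfl

-- ===== VERDICT (by name: the statement is the Claim_ definition above) =====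
theorem detect_puts_start_spec : Claim_equal_detect_puts_start := by
  intro ch _
  unfold Spec_detect_puts_start detect_puts_start detect_puts_start_alt pvFindIn
  have eT : (fun p : Int × String => PySem.Str.isIn "ticket" (PySem.Str.lower p.2)) =
      (fun p : Int × String => pvQT p.2) := rfl
  have eP : (fun p : Int × String => PySem.Str.isIn "puts" (PySem.Str.lower p.2)) =
      (fun p : Int × String => pvQP p.2) := rfl
  simp only [eT, eP]
  rw [enum_filter_map_eq_idxs pvQT ch 0, enum_find_map_eq_idxs_head pvQT ch 0,
      enum_find_map_eq_idxs_head pvQP ch 0, fallback_eq ch]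
  cases hI : pvIdxs pvQT ch with
  | nil =>
    simp only [List.map_nil, List.length_nil, List.head?_nil, Option.map_none]
    rw [if_neg (by omega)]
  | cons k0 rest =>
    have hdropIdx := idxs_tail_eq_drop pvQT ch k0 rest hI
    have hslice : PySem.List.slice ch (some ((0 : Int) + (k0 : Int) + 1)) none = ch.drop (k0 + 1) := by
      have h1 : ((0 : Int) + (k0 : Int) + 1) = ((k0 + 1 : Nat) : Int) := by push_cast; ring
      rw [h1, PySem.List.slice_from_natCast]
    simp only [List.head?_cons, Option.map_some, hslice]
    rw [enum_find_map_eq_idxs_head pvQT (ch.drop (k0 + 1)) 0]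
    cases hD : pvIdxs pvQT (ch.drop (k0 + 1)) with
    | nil =>
      have hrest : rest = [] := by rw [hdropIdx, hD]; simp
      subst hrest
      simp only [List.map_cons, List.map_nil, List.length_cons, List.length_nil,
        List.head?_nil, Option.map_none]
      rw [if_neg (by omega)]
    | cons j0 r =>
      have hrest : rest = (j0 + (k0 + 1)) :: r.map (· + (k0 + 1)) := by
        rw [hdropIdx, hD]; simp
      subst hrest
      simp only [List.map_cons, List.length_cons, List.head?_cons, Option.map_some]
      rw [if_pos (by omega)]
      have hsecond :
          (((0 : Int) + (k0 : Int)) :: ((0 : Int) + ((j0 + (k0 + 1) : Nat) : Int)) ::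
            (List.map (· + (k0 + 1)) r).map (fun k : Nat => (0 : Int) + (k : Int)))[1]! =
          ((0 : Int) + ((j0 + (k0 + 1) : Nat) : Int)) := by
        rfl
      rw [hsecond]
      push_cast
      congr 1
      ring
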